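-- pv_equiv track=rewrite | github.com/Am1r-codes/OpenSurgAI | src/phase/pipeline.py | enforce_min_duration
-- ===== SOURCE A (Python) =====
-- def enforce_min_duration(labels: list[int], min_len: int) -> list[int]:
--     """Merge segments shorter than *min_len* frames into neighbours.
--
--     Scans left-to-right.  Any segment shorter than *min_len* is replaced
--     by the label of the preceding segment (or the following segment if
--     it is the first).
--     """
--     if min_len <= 1 or not labels:
--         return list(labels)
--
--     # Build run-length encoding
--     runs: list[tuple[int, int]] = []  # (label, length)
--     cur_label = labels[0]
--     cur_len = 1
--     for lbl in labels[1:]: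
--         if lbl == cur_label:
--             cur_len += 1
--         else:
--             runs.append((cur_label, cur_len))
--             cur_label = lbl
--             cur_len = 1
--     runs.append((cur_label, cur_len))
--
--     # Merge short runs into the previous segment
--     merged: list[tuple[int, int]] = []
--     for label, length in runs:
--         if length < min_len and merged:
--             prev_label, prev_len = merged[-1]
--             merged[-1] = (prev_label, prev_len + length)
--         else:
--             merged.append((label, length))
--
--     # Expand back to per-frame labels
--     result: list[int] = []
--     for label, length in merged:
--         result.extend([label] * length)
--     return result
-- ===== SOURCE B (Python) =====
-- def enforce_min_duration(labels: list[int], min_len: int) -> list[int]: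
--     """Single left-to-right pass: emit each run as it completes, merging
--     short runs into the previously emitted label on the fly."""
--     if min_len <= 1 or not labels:
--         return list(labels)
--     result: list[int] = []
--     cur = labels[0]
--     n = 1
--     for lbl in labels[1:]:
--         if lbl == cur:
--             n += 1
--         else:
--             out = result[-1] if (n < min_len and result) else cur
--             result.extend([out] * n)
--             cur, n = lbl, 1
--     out = result[-1] if (n < min_len and result) else cur
--     result.extend([out] * n)
--     return result
-- ===== Notes on version B (the rewrite author's own statement) =====
-- stated objective: simpler
-- what changed: Replaced A's three-phase pipeline (build a run-length table, merge short runs into it, expand it back to frames) by a single left-to-right pass that emits each run as it completes, repeating the last emitted label when the run is short.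
import Mathlib
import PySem

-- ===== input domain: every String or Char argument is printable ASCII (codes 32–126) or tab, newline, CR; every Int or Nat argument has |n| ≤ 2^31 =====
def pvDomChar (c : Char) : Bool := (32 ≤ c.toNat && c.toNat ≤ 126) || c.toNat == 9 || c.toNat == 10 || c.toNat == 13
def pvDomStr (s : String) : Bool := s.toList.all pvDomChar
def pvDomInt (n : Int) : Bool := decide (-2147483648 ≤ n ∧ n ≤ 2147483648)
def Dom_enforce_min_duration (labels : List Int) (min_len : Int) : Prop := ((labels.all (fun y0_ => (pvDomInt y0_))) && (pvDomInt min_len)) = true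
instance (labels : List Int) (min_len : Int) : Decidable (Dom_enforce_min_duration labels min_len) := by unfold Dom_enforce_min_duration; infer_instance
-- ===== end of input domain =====

-- B replaces A's three-phase pipeline (RLE table, merge pass, expand pass) by a single
-- left-to-right pass that emits each run as it completes (objective: simpler).

-- ===== PORT A =====
-- state of the RLE-building loop: (runs, cur_label, cur_len)
def aRleStep (s : List (Int × Int) × Int × Int) (lbl : Int) : List (Int × Int) × Int × Int :=
  if lbl = s.2.1 then (s.1, s.2.1, s.2.2 + 1)
  else (s.1 ++ [(s.2.1, s.2.2)], lbl, 1)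

-- one iteration of the merge loop; merged[-1] read as pyGetD merged (-1), written back as dropLast ++ [·]
def aMergeStep (min_len : Int) (merged : List (Int × Int)) (p : Int × Int) : List (Int × Int) :=
  if p.2 < min_len ∧ merged ≠ [] then
    let prev := PySem.List.pyGetD merged (-1) (0, 0)
    merged.dropLast ++ [(prev.1, prev.2 + p.2)]
  else merged ++ [p]

def enforce_min_duration (labels : List Int) (min_len : Int) : List Int :=
  if min_len ≤ 1 ∨ labels = [] then labels
  else
    match labels with
    | [] => labels
    | l0 :: rest =>
      let s := rest.foldl aRleStep ([], l0, 1)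
      let runs := s.1 ++ [(s.2.1, s.2.2)]
      let merged := runs.foldl (aMergeStep min_len) []
      -- [label] * length: length is always ≥ 1 here; .toNat is exact
      merged.foldl (fun acc p => acc ++ List.replicate p.2.toNat p.1) []

-- ===== PORT B =====
-- flush one completed run of label cur, length n onto result (result[-1] read as pyGetD)
def altFlush (min_len : Int) (result : List Int) (cur : Int) (n : Int) : List Int :=
  if n < min_len ∧ result ≠ [] then
    result ++ List.replicate n.toNat (PySem.List.pyGetD result (-1) 0)
  else result ++ List.replicate n.toNat cur

-- the single pass over labels[1:]
def altLoop (min_len : Int) : List Int → List Int → Int → Int → List Int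
  | [], result, cur, n => altFlush min_len result cur n
  | lbl :: rest, result, cur, n =>
    if lbl = cur then altLoop min_len rest result cur (n + 1)
    else altLoop min_len rest (altFlush min_len result cur n) lbl 1

def enforce_min_duration_alt (labels : List Int) (min_len : Int) : List Int :=
  if min_len ≤ 1 ∨ labels = [] then labels
  else
    match labels with
    | [] => labels
    | l0 :: rest => altLoop min_len rest [] l0 1

-- ===== PRECONDITION & SPEC =====
def Spec_enforce_min_duration (labels : List Int) (min_len : Int) (out : List Int) : Prop := out = enforce_min_duration_alt labels min_len
instance (labels : List Int) (min_len : Int) (out : List Int) : Decidable (Spec_enforce_min_duration labels min_len out) := by unfold Spec_enforce_min_duration; infer_instance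

-- ===== CLAIM (what is proved, stated in full; the proofs are below) =====
def Claim_equal_enforce_min_duration : Prop := ∀ (labels : List Int) (min_len : Int), Dom_enforce_min_duration labels min_len → Spec_enforce_min_duration labels min_len (enforce_min_duration labels min_len)

-- ===== LEMMAS AND PROOFS =====

-- the run-length encoding of (cn copies of cl) ++ rest, as both loops implicitly build it
def runsOf : List Int → Int → Int → List (Int × Int)
  | [], cl, cn => [(cl, cn)]
  | l :: rs, cl, cn => if l = cl then runsOf rs cl (cn + 1) else (cl, cn) :: runsOf rs l 1

def expandRuns (m : List (Int × Int)) : List Int :=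
  m.flatMap (fun p => List.replicate p.2.toNat p.1)

lemma altLoop_eq_foldl (min_len : Int) :
    ∀ (rest result : List Int) (cl cn : Int),
      altLoop min_len rest result cl cn =
        (runsOf rest cl cn).foldl (fun r p => altFlush min_len r p.1 p.2) result := by
  intro rest
  induction rest with
  | nil => intro result cl cn; simp [altLoop, runsOf]
  | cons l rs ih =>
    intro result cl cn
    by_cases h : l = cl <;> simp [altLoop, runsOf, h, ih]

lemma rle_foldl_eq (rest : List Int) :
    ∀ (runsAcc : List (Int × Int)) (cl cn : Int),
      (rest.foldl aRleStep (runsAcc, cl, cn)).1 ++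
        [((rest.foldl aRleStep (runsAcc, cl, cn)).2.1, (rest.foldl aRleStep (runsAcc, cl, cn)).2.2)] =
      runsAcc ++ runsOf rest cl cn := by
  induction rest with
  | nil => intro runsAcc cl cn; simp [runsOf]
  | cons l rs ih =>
    intro runsAcc cl cn
    by_cases h : l = cl
    · simp [aRleStep, h, runsOf, ih]
    · simp [aRleStep, h, runsOf, ih]

lemma runsOf_pos : ∀ (rest : List Int) (cl cn : Int), 1 ≤ cn →
    ∀ p ∈ runsOf rest cl cn, 1 ≤ p.2 := by
  intro rest
  induction rest with
  | nil => intro cl cn hcn p hp; simp [runsOf] at hp; simp [hp]; omega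
  | cons l rs ih =>
    intro cl cn hcn p hp
    by_cases h : l = cl
    · simp [runsOf, h] at hp; exact ih cl (cn + 1) (by omega) p hp
    · simp [runsOf, h] at hp
      rcases hp with hp | hp
      · simp [hp]; omega
      · exact ih l 1 le_rfl p hp

lemma expandRuns_concat (m : List (Int × Int)) (p : Int × Int) :
    expandRuns (m ++ [p]) = expandRuns m ++ List.replicate p.2.toNat p.1 := by
  simp [expandRuns]

lemma expandRuns_ne_nil {m : List (Int × Int)} (hpos : ∀ p ∈ m, 1 ≤ p.2) (hm : m ≠ []) :
    expandRuns m ≠ [] := by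
  rcases m with _ | ⟨p, m'⟩
  · exact absurd rfl hm
  · have h1 : 1 ≤ p.2 := hpos p (by simp)
    intro hcontra
    have := congrArg List.length hcontra
    simp [expandRuns] at this
    omega

lemma pyGetD_append_replicate {α : Type} (xs : List α) (a : α) (n : Int) (hn : 1 ≤ n) (d : α) :
    PySem.List.pyGetD (xs ++ List.replicate n.toNat a) (-1) d = a := by
  have hrep : List.replicate n.toNat a = List.replicate (n.toNat - 1) a ++ [a] := by
    conv_lhs => rw [show n.toNat = (n.toNat - 1) + 1 from by omega]
    rw [List.replicate_add, List.replicate_one]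
  rw [hrep, ← List.append_assoc, PySem.List.pyGetD_neg_one_append_singleton]

-- core: expanding A's merge fold equals B's flush fold over the same runs
lemma merge_expand_eq (min_len : Int) :
    ∀ (runs merged : List (Int × Int)),
      (∀ p ∈ merged, 1 ≤ p.2) → (∀ p ∈ runs, 1 ≤ p.2) →
      expandRuns (runs.foldl (aMergeStep min_len) merged) =
        runs.foldl (fun r p => altFlush min_len r p.1 p.2) (expandRuns merged) := by
  intro runs
  induction runs with
  | nil => intro merged _ _; simp
  | cons p rs ih =>
    intro merged hmerged hruns
    have hp : 1 ≤ p.2 := hruns p (by simp)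
    have hrs : ∀ q ∈ rs, 1 ≤ q.2 := fun q hq => hruns q (by simp [hq])
    simp only [List.foldl_cons]
    by_cases hc : p.2 < min_len ∧ merged ≠ []
    · -- merge into previous
      rcases List.eq_nil_or_concat merged with hnil | ⟨m', q, hm⟩
      · exact absurd hnil hc.2
      subst hm
      simp only [List.concat_eq_append] at hmerged hc ⊢
      have hq : 1 ≤ q.2 := hmerged q (by simp)
      have hstep : aMergeStep min_len (m' ++ [q]) p = m' ++ [(q.1, q.2 + p.2)] := by
        simp [aMergeStep, hc, PySem.List.pyGetD_neg_one_append_singleton]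
      have hne : expandRuns (m' ++ [q]) ≠ [] := expandRuns_ne_nil hmerged hc.2
      have hflush : altFlush min_len (expandRuns (m' ++ [q])) p.1 p.2 =
          expandRuns (m' ++ [(q.1, q.2 + p.2)]) := by
        rw [altFlush, if_pos ⟨hc.1, hne⟩]
        rw [expandRuns_concat m' q, expandRuns_concat m' (q.1, q.2 + p.2)]
        rw [pyGetD_append_replicate _ _ _ hq]
        have htn : (q.2 + p.2).toNat = q.2.toNat + p.2.toNat := Int.toNat_add (by omega) (by omega)
        rw [htn, List.replicate_add, List.append_assoc]
      rw [hstep, hflush]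
      exact ih (m' ++ [(q.1, q.2 + p.2)])
        (by intro r hr; rcases List.mem_append.1 hr with h | h
            · exact hmerged r (by simp [h])
            · simp at h; simp [h]; omega) hrs
    · -- append as-is
      have hstep : aMergeStep min_len merged p = merged ++ [p] := by
        simp only [aMergeStep]; rw [if_neg hc]
      have hcond : ¬ (p.2 < min_len ∧ expandRuns merged ≠ []) := by
        intro ⟨h1, h2⟩
        apply hc
        refine ⟨h1, ?_⟩
        intro hmnil
        subst hmnil
        simp [expandRuns] at h2
      have hflush : altFlush min_len (expandRuns merged) p.1 p.2 = expandRuns (merged ++ [p]) := by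
        rw [altFlush, if_neg hcond, expandRuns_concat]
      rw [hstep, hflush]
      exact ih (merged ++ [p])
        (by intro r hr; rcases List.mem_append.1 hr with h | h
            · exact hmerged r h
            · simp at h; simp [h]; exact hp) hrs

-- ===== VERDICT (by name: the statement is the Claim_ definition above) =====
theorem enforce_min_duration_spec : Claim_equal_enforce_min_duration := by
  intro labels min_len _
  unfold Spec_enforce_min_duration enforce_min_duration enforce_min_duration_alt
  by_cases hg : min_len ≤ 1 ∨ labels = []
  · simp [hg]
  · rw [if_neg hg, if_neg hg]
    rcases labels with _ | ⟨l0, rest⟩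
    · rfl
    · simp only
      rw [altLoop_eq_foldl]
      have hruns := rle_foldl_eq rest [] l0 1
      simp only [List.nil_append] at hruns
      rw [PySem.List.foldl_append_eq_flatMap]
      have := merge_expand_eq min_len (runsOf rest l0 1) [] (by simp) (runsOf_pos rest l0 1 le_rfl)
      simp only [expandRuns] at this hruns ⊢
      rw [hruns, this]
      simp
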